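-- pv_equiv track=rewrite | github.com/bfxh/ai-platform | core/evo_engine.py | _generate_fix_suggestion
-- ===== SOURCE A (Python) =====
-- from typing import Dict, Any, Optional, List, Tuple
--
-- def _generate_fix_suggestion(action: str,
--                               top_errors: List[Tuple[str, int]]) -> str:
--     """根据错误模式生成修复建议"""
--     error_keywords = [e[0] for e in top_errors]
--
--     suggestions = []
--     if "timeout" in error_keywords:
--         suggestions.append("增加超时时间")
--     if "not found" in error_keywords:
--         suggestions.append("添加路径验证前检查")
--     if "permission" in error_keywords or "denied" in error_keywords:
--         suggestions.append("检查权限配置")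
--     if "connection" in error_keywords:
--         suggestions.append("添加连接重试逻辑")
--     if "syntax" in error_keywords:
--         suggestions.append("在写入前做语法检查")
--     if "encoding" in error_keywords:
--         suggestions.append("统一使用 UTF-8 编码")
--
--     if suggestions:
--         return f"{action}: {', '.join(suggestions)}"
--     return f"{action}: 检查失败原因并改进"
-- ===== SOURCE B (Python) =====
-- _KW2RULE = {"timeout": 0, "not found": 1, "permission": 2, "denied": 2,
--             "connection": 3, "syntax": 4, "encoding": 5}
-- _SUGGESTIONS = ["增加超时时间", "添加路径验证前检查", "检查权限配置",
--                 "添加连接重试逻辑", "在写入前做语法检查", "统一使用 UTF-8 编码"]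
--
--
-- def _generate_fix_suggestion(action, top_errors):
--     # One pass over the data: mark which rule fires, then emit in rule order.
--     fired = [False] * 6
--     for e in top_errors:
--         i = _KW2RULE.get(e[0])
--         if i is not None:
--             fired[i] = True
--     suggestions = [s for f, s in zip(fired, _SUGGESTIONS) if f]
--     if suggestions:
--         return f"{action}: {', '.join(suggestions)}"
--     return f"{action}: 检查失败原因并改进"
-- ===== Notes on version B (the rewrite author's own statement) =====
-- stated objective: alternative
-- what changed: Inverts the traversal: instead of six membership scans of the keyword list (one per rule), B makes a single pass over top_errors, mapping each keyword through a keyword-to-rule-index dict into a fired-flags array, then emits suggestions from the flags in rule order.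
import Mathlib
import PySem

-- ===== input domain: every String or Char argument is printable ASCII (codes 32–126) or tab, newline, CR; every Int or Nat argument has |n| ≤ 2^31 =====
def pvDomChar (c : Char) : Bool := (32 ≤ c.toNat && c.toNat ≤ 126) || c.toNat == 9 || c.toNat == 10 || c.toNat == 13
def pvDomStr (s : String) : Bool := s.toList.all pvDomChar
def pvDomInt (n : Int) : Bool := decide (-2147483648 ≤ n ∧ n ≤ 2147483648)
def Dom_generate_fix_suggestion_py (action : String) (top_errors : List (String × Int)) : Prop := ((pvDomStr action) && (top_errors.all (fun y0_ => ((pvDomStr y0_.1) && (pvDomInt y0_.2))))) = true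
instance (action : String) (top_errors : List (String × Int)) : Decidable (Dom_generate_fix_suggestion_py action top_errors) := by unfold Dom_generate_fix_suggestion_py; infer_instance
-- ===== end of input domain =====

-- B inverts the traversal: one pass over top_errors marking a fired-flags array via a
-- keyword→rule-index dict, then emit suggestions from the flags (objective: alternative;
-- return value is identical).

-- ===== PORT A =====
def generate_fix_suggestion_py (action : String) (top_errors : List (String × Int)) : String :=
  let error_keywords := top_errors.map (fun e => e.1)
  let suggestions : List String := []
  let suggestions := if error_keywords.contains "timeout" then suggestions ++ ["增加超时时间"] else suggestions
  let suggestions := if error_keywords.contains "not found" then suggestions ++ ["添加路径验证前检查"] else suggestions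
  let suggestions := if error_keywords.contains "permission" || error_keywords.contains "denied" then suggestions ++ ["检查权限配置"] else suggestions
  let suggestions := if error_keywords.contains "connection" then suggestions ++ ["添加连接重试逻辑"] else suggestions
  let suggestions := if error_keywords.contains "syntax" then suggestions ++ ["在写入前做语法检查"] else suggestions
  let suggestions := if error_keywords.contains "encoding" then suggestions ++ ["统一使用 UTF-8 编码"] else suggestions
  if suggestions.isEmpty then action ++ ": 检查失败原因并改进"
  else action ++ ": " ++ String.intercalate ", " suggestions

-- ===== PORT B =====
def pvKw2Rule : PySem.Dict String Nat :=
  PySem.Dict.ofList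
    [("timeout", 0), ("not found", 1), ("permission", 2), ("denied", 2),
     ("connection", 3), ("syntax", 4), ("encoding", 5)]

def pvSuggestions : List String :=
  ["增加超时时间", "添加路径验证前检查", "检查权限配置",
   "添加连接重试逻辑", "在写入前做语法检查", "统一使用 UTF-8 编码"]

def pvMark (fired : List Bool) (e : String × Int) : List Bool :=
  match PySem.Dict.get? pvKw2Rule e.1 with
  | none => fired
  | some i => fired.set i true

def generate_fix_suggestion_py_alt (action : String) (top_errors : List (String × Int)) : String :=
  let fired := top_errors.foldl pvMark [false, false, false, false, false, false]
  let suggestions := ((fired.zip pvSuggestions).filter (fun p => p.1)).map (fun p => p.2)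
  if suggestions.isEmpty then action ++ ": 检查失败原因并改进"
  else action ++ ": " ++ String.intercalate ", " suggestions

-- ===== PRECONDITION & SPEC =====
def Spec_generate_fix_suggestion_py (action : String) (top_errors : List (String × Int)) (out : String) : Prop := out = generate_fix_suggestion_py_alt action top_errors
instance (action : String) (top_errors : List (String × Int)) (out : String) : Decidable (Spec_generate_fix_suggestion_py action top_errors out) := by unfold Spec_generate_fix_suggestion_py; infer_instance

-- ===== CLAIM (what is proved, stated in full; the proofs are below) =====
def Claim_equal_generate_fix_suggestion_py : Prop := ∀ (action : String) (top_errors : List (String × Int)), Dom_generate_fix_suggestion_py action top_errors → Spec_generate_fix_suggestion_py action top_errors (generate_fix_suggestion_py action top_errors)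

-- ===== LEMMAS AND PROOFS =====

-- The one-pass fold computes exactly the seven membership facts A tests.
theorem mark_eq (a b c d e f : Bool) (hd : String × Int) :
    pvMark [a, b, c, d, e, f] hd =
      [a || ("timeout" == hd.1), b || ("not found" == hd.1),
       c || ("permission" == hd.1) || ("denied" == hd.1),
       d || ("connection" == hd.1), e || ("syntax" == hd.1),
       f || ("encoding" == hd.1)] := by
  obtain ⟨s, n⟩ := hd
  by_cases h1 : s = "timeout"
  · subst h1
    have g : PySem.Dict.get? pvKw2Rule "timeout" = some 0 := by rfl
    simp [pvMark, g, List.set]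
  by_cases h2 : s = "not found"
  · subst h2
    have g : PySem.Dict.get? pvKw2Rule "not found" = some 1 := by rfl
    simp [pvMark, g, List.set]
  by_cases h3 : s = "permission"
  · subst h3
    have g : PySem.Dict.get? pvKw2Rule "permission" = some 2 := by rfl
    simp [pvMark, g, List.set]
  by_cases h4 : s = "denied"
  · subst h4
    have g : PySem.Dict.get? pvKw2Rule "denied" = some 2 := by rfl
    simp [pvMark, g, List.set]
  by_cases h5 : s = "connection"
  · subst h5
    have g : PySem.Dict.get? pvKw2Rule "connection" = some 3 := by rfl
    simp [pvMark, g, List.set]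
  by_cases h6 : s = "syntax"
  · subst h6
    have g : PySem.Dict.get? pvKw2Rule "syntax" = some 4 := by rfl
    simp [pvMark, g, List.set]
  by_cases h7 : s = "encoding"
  · subst h7
    have g : PySem.Dict.get? pvKw2Rule "encoding" = some 5 := by rfl
    simp [pvMark, g, List.set]
  · have g : PySem.Dict.get? pvKw2Rule s = none := by
      have hmk : pvKw2Rule = PySem.Dict.mk
          [("timeout", 0), ("not found", 1), ("permission", 2), ("denied", 2),
           ("connection", 3), ("syntax", 4), ("encoding", 5)] := by decide
      rw [hmk]
      simp only [PySem.Dict.get?_mk_cons, beq_iff_eq,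
        if_neg (Ne.symm h1), if_neg (Ne.symm h2),
        if_neg (Ne.symm h3), if_neg (Ne.symm h4),
        if_neg (Ne.symm h5), if_neg (Ne.symm h6),
        if_neg (Ne.symm h7)]
      rfl
    simp only [pvMark, g]
    have e1 : ("timeout" == s) = false := beq_eq_false_iff_ne.mpr (Ne.symm h1)
    have e2 : ("not found" == s) = false := beq_eq_false_iff_ne.mpr (Ne.symm h2)
    have e3 : ("permission" == s) = false := beq_eq_false_iff_ne.mpr (Ne.symm h3)
    have e4 : ("denied" == s) = false := beq_eq_false_iff_ne.mpr (Ne.symm h4)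
    have e5 : ("connection" == s) = false := beq_eq_false_iff_ne.mpr (Ne.symm h5)
    have e6 : ("syntax" == s) = false := beq_eq_false_iff_ne.mpr (Ne.symm h6)
    have e7 : ("encoding" == s) = false := beq_eq_false_iff_ne.mpr (Ne.symm h7)
    simp [e1, e2, e3, e4, e5, e6, e7]

theorem fold_mark_eq (l : List (String × Int)) (a b c d e f : Bool) :
    l.foldl pvMark [a, b, c, d, e, f] =
      [a || (l.map Prod.fst).contains "timeout",
       b || (l.map Prod.fst).contains "not found",
       c || (l.map Prod.fst).contains "permission" || (l.map Prod.fst).contains "denied",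
       d || (l.map Prod.fst).contains "connection",
       e || (l.map Prod.fst).contains "syntax",
       f || (l.map Prod.fst).contains "encoding"] := by
  induction l generalizing a b c d e f with
  | nil => simp
  | cons hd tl ih =>
    simp only [List.foldl_cons, List.map_cons, List.contains_cons]
    rw [mark_eq, ih]
    simp only [List.cons.injEq]
    and_intros <;> first | trivial | ac_rfl

-- ===== VERDICT (by name: the statement is the Claim_ definition above) =====
theorem generate_fix_suggestion_py_spec : Claim_equal_generate_fix_suggestion_py := by
  intro action top_errors _
  unfold Spec_generate_fix_suggestion_py generate_fix_suggestion_py generate_fix_suggestion_py_alt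
  rw [fold_mark_eq]
  simp only [Bool.false_or, pvSuggestions]
  generalize (top_errors.map Prod.fst).contains "timeout" = b1
  generalize (top_errors.map Prod.fst).contains "not found" = b2
  generalize (top_errors.map Prod.fst).contains "permission" = b3
  generalize (top_errors.map Prod.fst).contains "denied" = b4
  generalize (top_errors.map Prod.fst).contains "connection" = b5
  generalize (top_errors.map Prod.fst).contains "syntax" = b6
  generalize (top_errors.map Prod.fst).contains "encoding" = b7
  cases b1 <;> cases b2 <;> cases b3 <;> cases b4 <;> cases b5 <;> cases b6 <;> cases b7 <;> rfl
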